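-- pv_equiv track=rewrite | github.com/BitSecret/FormalGeo | solver/method/backward_search.py | theorem_para_completion
-- ===== SOURCE A (Python) =====
-- from itertools import permutations
--
-- def theorem_para_completion(t_paras, points):
--     """
--     Replace free vars with points.
--     >> theorem_para_completion([['a', 'R', 'S']], ['A', 'R', 'S'])
--     >> [['A', 'R', 'S'], ['R', 'R', 'S'], ['S', 'R', 'S']]
--     """
--     points = [points[i][0] for i in range(len(points))]
--     results = set()
--     for t_para in t_paras:
--         vacant_index = []
--         for i in range(len(t_para)):
--             if t_para[i].islower():
--                 vacant_index.append(i)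
--         for per_para in permutations(points, len(vacant_index)):
--             result = [t_para[i] if i not in vacant_index else per_para[vacant_index.index(i)]
--                       for i in range(len(t_para))]
--             results.add(tuple(result))
--     return results
-- ===== SOURCE B (Python) =====
-- def theorem_para_completion(t_paras, points):
--     firsts = [p[0] for p in points]
--     results = set()
--
--     def fill(slots, avail):
--         if not slots:
--             return [[]]
--         head, rest = slots[0], slots[1:]
--         if head.islower():
--             return [[avail[k]] + tail
--                     for k in range(len(avail))
--                     for tail in fill(rest, avail[:k] + avail[k + 1:])]
--         return [[head] + tail for tail in fill(rest, avail)]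
--
--     for t_para in t_paras:
--         for row in fill(t_para, firsts):
--             results.add(tuple(row))
--     return results
-- ===== Notes on version B (the rewrite author's own statement) =====
-- stated objective: alternative
-- what changed: Replaced the permutations-of-points enumeration plus index-template comprehension (membership test and vacant_index.index lookup per cell) by a direct recursive backtracking fill that walks the template once, branching over the still-available points at each lowercase slot.
import Mathlib
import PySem

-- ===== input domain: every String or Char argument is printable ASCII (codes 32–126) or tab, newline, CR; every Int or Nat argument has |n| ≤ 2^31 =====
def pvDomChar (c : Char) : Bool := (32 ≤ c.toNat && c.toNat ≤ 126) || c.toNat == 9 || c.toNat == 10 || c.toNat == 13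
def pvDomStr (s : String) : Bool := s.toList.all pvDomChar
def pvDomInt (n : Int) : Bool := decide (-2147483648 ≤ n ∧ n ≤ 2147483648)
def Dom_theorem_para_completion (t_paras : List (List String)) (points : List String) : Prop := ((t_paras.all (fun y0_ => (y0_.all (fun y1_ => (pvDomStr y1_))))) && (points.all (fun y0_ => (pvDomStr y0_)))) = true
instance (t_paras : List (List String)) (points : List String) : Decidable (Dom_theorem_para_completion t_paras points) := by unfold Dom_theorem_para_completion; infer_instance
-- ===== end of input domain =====

-- B replaces A's permutations-plus-index-template construction by a direct recursive
-- backtracking fill of the template (objective: alternative decomposition, similar cost).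

-- ===== PORT A =====
-- str.islower(): some cased character present and no uppercase one — exact on the ASCII domain Dom gives
def pvStrIslower (s : String) : Bool :=
  s.toList.any PySem.Chars.islower && s.toList.all (fun c => !PySem.Chars.isupper c)

def theorem_para_completion (t_paras : List (List String)) (points : List String) : List (List String) :=
  -- points = [points[i][0] for i in range(len(points))]; points[i][0] raises on an empty
  -- string (excluded by Pre_), here it yields "" via take 1
  let pts := (List.range points.length).map (fun i => String.ofList ((points.getD i "").toList.take 1))
  t_paras.foldl (fun results t_para =>
    -- the vacant_index loop
    let vacant := (List.range t_para.length).foldl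
      (fun acc i => if pvStrIslower (t_para.getD i "") then acc ++ [i] else acc) []
    -- for per_para in permutations(points, len(vacant_index)): results.add(tuple(result))
    (PySem.List.permutations pts vacant.length).foldl (fun results per =>
      -- the result comprehension; vacant_index.index(i) is List.idxOf (exact: i ∈ vacant there)
      PySem.Set.add results ((List.range t_para.length).map (fun i =>
        if vacant.contains i then per.getD (vacant.idxOf i) "" else t_para.getD i "")))
      results)
    PySem.Set.empty

-- ===== PORT B =====
-- fill(slots, avail): recursive backtracking; avail[:k]+avail[k+1:] is eraseIdx k, avail[k] is getD (k < len avail)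
def pvFill (slots : List String) (avail : List String) : List (List String) :=
  match slots with
  | [] => [[]]
  | head :: rest =>
    if pvStrIslower head then
      (List.range avail.length).flatMap (fun k =>
        (pvFill rest (avail.eraseIdx k)).map (fun tail => avail.getD k "" :: tail))
    else
      (pvFill rest avail).map (fun tail => head :: tail)

def theorem_para_completion_alt (t_paras : List (List String)) (points : List String) : List (List String) :=
  let firsts := points.map (fun p => String.ofList (p.toList.take 1))
  t_paras.foldl (fun results t_para =>
    (pvFill t_para firsts).foldl (fun results row => PySem.Set.add results row) results)
    PySem.Set.empty

-- ===== PRECONDITION & SPEC =====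
-- Pre_ excludes an empty string among points: there both A and B raise IndexError on p[0].
def Pre_theorem_para_completion (t_paras : List (List String)) (points : List String) : Prop :=
  ∀ p ∈ points, p ≠ ""
instance (t_paras : List (List String)) (points : List String) : Decidable (Pre_theorem_para_completion t_paras points) := by unfold Pre_theorem_para_completion; infer_instance

def pvWitness_theorem_para_completion : List (List String) × List String :=
  ([["a", "R", "S"]], ["A", "R", "S"])

def Spec_theorem_para_completion (t_paras : List (List String)) (points : List String) (out : List (List String)) : Prop := out = theorem_para_completion_alt t_paras points
instance (t_paras : List (List String)) (points : List String) (out : List (List String)) : Decidable (Spec_theorem_para_completion t_paras points out) := by unfold Spec_theorem_para_completion; infer_instance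

-- ===== CLAIM (what is proved, stated in full; the proofs are below) =====
def Claim_equal_theorem_para_completion : Prop := ∀ (t_paras : List (List String)) (points : List String), Dom_theorem_para_completion t_paras points → Pre_theorem_para_completion t_paras points → Spec_theorem_para_completion t_paras points (theorem_para_completion t_paras points)

-- ===== LEMMAS AND PROOFS =====

-- the row A's comprehension builds, seen as consuming `per` at the lowercase slots
def pvZipFill (slots : List String) (per : List String) : List String :=
  match slots with
  | [] => []
  | s :: rest =>
    if pvStrIslower s then per.headD "" :: pvZipFill rest per.tail
    else s :: pvZipFill rest per

def pvVacant (t_para : List String) : List Nat :=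
  (List.range t_para.length).filter (fun i => pvStrIslower (t_para.getD i ""))

lemma pvVacant_foldl (t_para : List String) :
    (List.range t_para.length).foldl
      (fun acc i => if pvStrIslower (t_para.getD i "") then acc ++ [i] else acc) []
      = pvVacant t_para := by
  simpa using PySem.List.foldl_append_if (fun i => pvStrIslower (t_para.getD i "")) id
    (List.range t_para.length) []

lemma pvVacant_cons (s : String) (rest : List String) :
    pvVacant (s :: rest)
      = (if pvStrIslower s then [0] else []) ++ (pvVacant rest).map (· + 1) := by
  unfold pvVacant
  rw [List.length_cons, List.range_succ_eq_map, List.filter_cons, List.filter_map]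
  have hp : List.filter ((fun i => pvStrIslower ((s :: rest).getD i "")) ∘ Nat.succ)
        (List.range rest.length)
      = List.filter (fun i => pvStrIslower (rest.getD i "")) (List.range rest.length) := by
    refine List.filter_congr ?_
    intro i _
    simp [List.getD]
  rw [hp]
  by_cases hs : pvStrIslower s
  · simp [hs, List.getD]
  · simp [hs, List.getD]

lemma pvIdxOfSucc (i : Nat) (v : List Nat) :
    List.idxOf (i + 1) (v.map (· + 1)) = List.idxOf i v := by
  induction v with
  | nil => simp
  | cons a v ih => by_cases h : a = i <;> simp [h, ih]

lemma pvGetDSucc {α : Type} (per : List α) (n : Nat) (d : α) :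
    per.getD (n + 1) d = per.tail.getD n d := by
  cases per <;> simp

-- A's result comprehension equals the zip-style fill of the template
lemma pvRow_eq_zipFill (t_para : List String) (per : List String) :
    (List.range t_para.length).map (fun i =>
        if (pvVacant t_para).contains i then per.getD ((pvVacant t_para).idxOf i) ""
        else t_para.getD i "")
      = pvZipFill t_para per := by
  induction t_para generalizing per with
  | nil => simp [pvZipFill]
  | cons s rest ih =>
    rw [pvVacant_cons, List.length_cons, List.range_succ_eq_map, List.map_cons, List.map_map]
    by_cases hs : pvStrIslower s
    · rw [if_pos hs, List.singleton_append]
      have hrow : ∀ i : Nat,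
          (if ((0 : Nat) :: (pvVacant rest).map (· + 1)).contains (i + 1) then
              per.getD (((0 : Nat) :: (pvVacant rest).map (· + 1)).idxOf (i + 1)) ""
            else (s :: rest).getD (i + 1) "")
          = (if (pvVacant rest).contains i then per.tail.getD ((pvVacant rest).idxOf i) ""
             else rest.getD i "") := by
        intro i
        by_cases hc : i ∈ pvVacant rest
        · have hc1 : ((0 : Nat) :: (pvVacant rest).map (· + 1)).contains (i + 1) = true := by
            exact List.contains_iff_mem.mpr
              (List.mem_cons_of_mem _ (List.mem_map.mpr ⟨i, hc, rfl⟩))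
          rw [if_pos hc1, if_pos (by simpa [List.contains_iff_mem] using hc)]
          have hidx : List.idxOf (i + 1) ((0 : Nat) :: (pvVacant rest).map (· + 1))
              = List.idxOf i (pvVacant rest) + 1 := by
            simp [pvIdxOfSucc i (pvVacant rest)]
          rw [hidx, pvGetDSucc]
        · rw [if_neg (by simpa [List.contains_iff_mem] using hc),
              if_neg (by simpa [List.contains_iff_mem] using hc)]
          simp [List.getD]
      show _ :: _ = pvZipFill (s :: rest) per
      rw [show pvZipFill (s :: rest) per = per.headD "" :: pvZipFill rest per.tail from by
        simp [pvZipFill, hs]]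
      refine congrArg₂ (· :: ·) ?_ ?_
      · simp [List.getD, List.head?_eq_getElem?]
      · exact (List.map_congr_left (fun i _ => hrow i)).trans (ih per.tail)
    · rw [if_neg hs, List.nil_append]
      have hrow : ∀ i : Nat,
          (if ((pvVacant rest).map (· + 1)).contains (i + 1) then
              per.getD (((pvVacant rest).map (· + 1)).idxOf (i + 1)) ""
            else (s :: rest).getD (i + 1) "")
          = (if (pvVacant rest).contains i then per.getD ((pvVacant rest).idxOf i) ""
             else rest.getD i "") := by
        intro i
        by_cases hc : i ∈ pvVacant rest
        · rw [if_pos (List.contains_iff_mem.mpr (List.mem_map.mpr ⟨i, hc, rfl⟩)),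
              if_pos (by simpa [List.contains_iff_mem] using hc), pvIdxOfSucc]
        · rw [if_neg (by simpa [List.contains_iff_mem] using hc),
              if_neg (by simpa [List.contains_iff_mem] using hc)]
          simp [List.getD]
      show _ :: _ = pvZipFill (s :: rest) per
      rw [show pvZipFill (s :: rest) per = s :: pvZipFill rest per from by simp [pvZipFill, hs]]
      refine congrArg₂ (· :: ·) ?_ ?_
      · rw [if_neg (by simp)]
        simp [List.getD]
      · exact (List.map_congr_left (fun i _ => hrow i)).trans (ih per)

-- the permutation-then-template pipeline equals the backtracking fill, row for row
lemma pvPerms_map_zipFill (t_para : List String) (avail : List String) :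
    (PySem.List.permutations avail (pvVacant t_para).length).map (pvZipFill t_para)
      = pvFill t_para avail := by
  induction t_para generalizing avail with
  | nil => simp [pvVacant, pvFill, pvZipFill]
  | cons s rest ih =>
    rw [pvVacant_cons]
    by_cases hs : pvStrIslower s
    · rw [if_pos hs, List.singleton_append, List.length_cons, List.length_map]
      rw [← Nat.succ_eq_add_one, PySem.List.permutations.eq_2, List.map_flatMap]
      show _ = pvFill (s :: rest) avail
      rw [show pvFill (s :: rest) avail = (List.range avail.length).flatMap (fun k =>
          (pvFill rest (avail.eraseIdx k)).map (fun tail => avail.getD k "" :: tail)) from by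
        simp [pvFill, hs]]
      refine List.flatMap_congr ?_
      intro k hk
      rw [List.mem_range] at hk
      rw [List.getElem?_eq_getElem hk]
      show ((PySem.List.permutations (avail.eraseIdx k) (pvVacant rest).length).map
          (fun p => avail[k] :: p)).map (pvZipFill (s :: rest)) = _
      rw [List.map_map]
      rw [show (pvZipFill (s :: rest)) ∘ (fun p => avail[k] :: p)
            = (fun tail => avail[k] :: tail) ∘ pvZipFill rest from
          funext (fun p => by simp [pvZipFill, hs])]
      rw [← List.map_map, ih]
      rw [show avail[k] = avail.getD k "" from (List.getD_eq_getElem avail "" hk).symm]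
    · rw [if_neg hs, List.nil_append, List.length_map]
      show _ = pvFill (s :: rest) avail
      rw [show pvFill (s :: rest) avail = (pvFill rest avail).map (fun tail => s :: tail) from by
        simp [pvFill, hs]]
      rw [← ih avail, List.map_map]
      exact List.map_congr_left (fun p _ => by simp [pvZipFill, hs])

lemma pvFirsts_eq (points : List String) :
    (List.range points.length).map (fun i => String.ofList ((points.getD i "").toList.take 1))
      = points.map (fun p => String.ofList (p.toList.take 1)) := by
  induction points with
  | nil => simp
  | cons a l ih =>
    rw [List.length_cons, List.range_succ_eq_map]
    simp only [List.map_cons, List.map_map]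
    refine congrArg₂ (· :: ·) (by simp [List.getD]) ?_
    refine ((List.map_congr_left ?_).trans ih)
    intro i _
    simp [List.getD]

-- ===== VERDICT (by name: the statement is the Claim_ definition above) =====
theorem theorem_para_completion_spec : Claim_equal_theorem_para_completion := by
  intro t_paras points _ _
  unfold Spec_theorem_para_completion theorem_para_completion theorem_para_completion_alt
  rw [pvFirsts_eq]
  refine List.foldl_ext _ _ _ ?_
  intro results t_para _
  rw [pvVacant_foldl]
  calc (PySem.List.permutations (points.map (fun p => String.ofList (p.toList.take 1)))
          (pvVacant t_para).length).foldl
        (fun results per => PySem.Set.add results ((List.range t_para.length).map (fun i =>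
          if (pvVacant t_para).contains i then per.getD ((pvVacant t_para).idxOf i) ""
          else t_para.getD i ""))) results
      = (PySem.List.permutations (points.map (fun p => String.ofList (p.toList.take 1)))
          (pvVacant t_para).length).foldl
        (fun results per => PySem.Set.add results (pvZipFill t_para per)) results := by
        refine List.foldl_ext _ _ _ ?_
        intro r per _
        rw [pvRow_eq_zipFill]
    _ = ((PySem.List.permutations (points.map (fun p => String.ofList (p.toList.take 1)))
          (pvVacant t_para).length).map
          (pvZipFill t_para)).foldl (fun results row => PySem.Set.add results row) results := by
        rw [List.foldl_map]
    _ = (pvFill t_para (points.map (fun p => String.ofList (p.toList.take 1)))).foldl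
          (fun results row => PySem.Set.add results row) results := by
        rw [pvPerms_map_zipFill]
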